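-- pv_equiv track=rewrite | github.com/NguyenTinh98/NER_MOCKPROJECT | utils/span.py | convert_spanformat
-- ===== SOURCE A (Python) =====
-- def convert_spanformat(arr):
--     if len(arr) < 1:
--         return None
--     text = ' '.join([i for i, j in arr])
--     pos = 0
--     start_end_labels = []
--     for word, tag in arr:
--         if len(start_end_labels) > 0 and tag == start_end_labels[-1][2]:
--             temp = [start_end_labels[-1][0], pos+len(word), tag]
--             start_end_labels[-1] = temp.copy()
--         else:
--             temp = [pos, pos+len(word), tag]
--             start_end_labels.append(temp)
--         pos += len(word) + 1
--
--     res = dict()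
--     for s, e, l in start_end_labels:
--         if l != 'O':
--             if l not in res:
--                 res[l] = [(s, e)]
--             else:
--                 res[l].append((s, e))
--     return res
-- ===== SOURCE B (Python) =====
-- def convert_spanformat(arr):
--     # One run-based pass: walk consecutive same-tag runs with a running offset,
--     # appending spans straight into the result dict (no intermediate span list).
--     if len(arr) < 1:
--         return None
--     res = {}
--     pos = 0
--     i = 0
--     n = len(arr)
--     while i < n:
--         tag = arr[i][1]
--         start = pos
--         end = pos
--         while i < n and arr[i][1] == tag:
--             end = pos + len(arr[i][0])
--             pos = end + 1
--             i += 1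
--         if tag != 'O':
--             res.setdefault(tag, []).append((start, end))
--     return res
-- ===== Notes on version B (the rewrite author's own statement) =====
-- stated objective: simpler
-- what changed: B replaces A's two passes (build a merge-on-last span list, then filter it into the dict) and A's unused ' '.join(text) with a single run-based pass that walks each consecutive same-tag run once and appends its (start, end) straight into the result dict via setdefault.
import Mathlib
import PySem

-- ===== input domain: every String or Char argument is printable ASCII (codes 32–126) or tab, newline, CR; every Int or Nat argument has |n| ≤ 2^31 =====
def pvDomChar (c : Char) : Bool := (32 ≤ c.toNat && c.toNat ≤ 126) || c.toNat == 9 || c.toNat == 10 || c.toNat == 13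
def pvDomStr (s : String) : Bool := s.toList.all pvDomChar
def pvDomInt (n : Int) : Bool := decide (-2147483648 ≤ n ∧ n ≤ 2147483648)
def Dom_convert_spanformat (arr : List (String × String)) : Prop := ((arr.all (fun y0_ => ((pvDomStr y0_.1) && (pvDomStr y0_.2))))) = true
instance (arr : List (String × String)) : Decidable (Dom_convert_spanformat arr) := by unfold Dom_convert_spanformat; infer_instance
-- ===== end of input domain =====

-- B is a simpler single run-based pass (no intermediate span list, no unused ' '.join);
-- equal return value everywhere (A mutates nothing observable).

-- ===== PORT A =====
-- loop state: (pos, start_end_labels held in REVERSED order: head = Python's last element)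
def aStep (st : Int × List (Int × Int × String)) (wt : String × String) :
    Int × List (Int × Int × String) :=
  let pos := st.1
  let word := wt.1
  let tag := wt.2
  let acc' :=
    match st.2 with
    | (s, e, t) :: rest =>
        if tag == t then (s, pos + PySem.Str.len word, tag) :: rest
        else (pos, pos + PySem.Str.len word, tag) :: (s, e, t) :: rest
    | [] => [(pos, pos + PySem.Str.len word, tag)]
  (pos + PySem.Str.len word + 1, acc')

def aIns (res : PySem.Dict String (List (Int × Int))) (sel : Int × Int × String) :
    PySem.Dict String (List (Int × Int)) :=
  let s := sel.1; let e := sel.2.1; let l := sel.2.2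
  if l ≠ "O" then
    if res.contains l = false then res.insert l [(s, e)]
    else res.insert l (res.getD l [] ++ [(s, e)])
  else res

def convert_spanformat (arr : List (String × String)) : Option (List (String × List (Int × Int))) :=
  if arr.length < 1 then none
  else
    -- 'text = " ".join(...)' is computed but unused in A; omitted
    let spans := ((arr.foldl aStep ((0 : Int), [])).2).reverse
    some (spans.foldl aIns PySem.Dict.empty).items

-- ===== PORT B =====
-- inner while: consume the current same-tag run; returns (end, pos', remaining)
def bRun (tag : String) : Int → Int → List (String × String) → Int × Int × List (String × String)
  | pos, endv, [] => (endv, pos, [])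
  | pos, endv, (w, t) :: rest =>
      if t == tag then bRun tag (pos + PySem.Str.len w + 1) (pos + PySem.Str.len w) rest
      else (endv, pos, (w, t) :: rest)

theorem bRun_length_le (tag : String) (pos endv : Int) (l : List (String × String)) :
    (bRun tag pos endv l).2.2.length ≤ l.length := by
  induction l generalizing pos endv with
  | nil => simp [bRun]
  | cons x rest ih =>
      obtain ⟨w, t⟩ := x
      simp only [bRun]
      split
      · exact le_trans (ih _ _) (Nat.le_succ _)
      · simp

-- res.setdefault(tag, []).append((start, end))
def bIns (res : PySem.Dict String (List (Int × Int))) (tag : String) (se : Int × Int) :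
    PySem.Dict String (List (Int × Int)) :=
  if tag ≠ "O" then res.modify tag [] (· ++ [se]) else res

def bLoop : Int → PySem.Dict String (List (Int × Int)) → List (String × String) →
    PySem.Dict String (List (Int × Int))
  | _, res, [] => res
  | pos, res, (w, t) :: rest =>
      let r := bRun t (pos + PySem.Str.len w + 1) (pos + PySem.Str.len w) rest
      bLoop r.2.1 (bIns res t (pos, r.1)) r.2.2
  termination_by _ _ l => l.length
  decreasing_by
    exact Nat.lt_succ_of_le (bRun_length_le _ _ _ _)

def convert_spanformat_alt (arr : List (String × String)) : Option (List (String × List (Int × Int))) :=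
  if arr.length < 1 then none
  else some (bLoop 0 PySem.Dict.empty arr).items

-- ===== PRECONDITION & SPEC =====
def Spec_convert_spanformat (arr : List (String × String)) (out : Option (List (String × List (Int × Int)))) : Prop := out = convert_spanformat_alt arr
instance (arr : List (String × String)) (out : Option (List (String × List (Int × Int)))) : Decidable (Spec_convert_spanformat arr out) := by unfold Spec_convert_spanformat; infer_instance

-- ===== CLAIM (what is proved, stated in full; the proofs are below) =====
def Claim_equal_convert_spanformat : Prop := ∀ (arr : List (String × String)), Dom_convert_spanformat arr → Spec_convert_spanformat arr (convert_spanformat arr)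

-- ===== LEMMAS AND PROOFS =====

-- the list of merged (start, end, tag) runs produced from position pos
def groups : Int → List (String × String) → List (Int × Int × String)
  | _, [] => []
  | pos, (w, t) :: rest =>
      let r := bRun t (pos + PySem.Str.len w + 1) (pos + PySem.Str.len w) rest
      (pos, r.1, t) :: groups r.2.1 r.2.2
  termination_by _ l => l.length
  decreasing_by
    exact Nat.lt_succ_of_le (bRun_length_le _ _ _ _)

-- A's first loop computes exactly the runs
theorem foldl_aStep_eq (l : List (String × String)) :
    ∀ (pos s e : Int) (t : String) (acc : List (Int × Int × String)),
    ((List.foldl aStep (pos, (s, e, t) :: acc) l).2).reverse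
      = acc.reverse ++ (s, (bRun t pos e l).1, t) ::
          groups (bRun t pos e l).2.1 (bRun t pos e l).2.2 := by
  induction l with
  | nil => intro pos s e t acc; simp [bRun, groups]
  | cons x rest ih =>
      intro pos s e t acc
      obtain ⟨w, t'⟩ := x
      by_cases h : (t' == t) = true
      · have ht : t' = t := beq_iff_eq.mp h
        subst ht
        simp only [List.foldl_cons, aStep, bRun, beq_self_eq_true, if_true]
        exact ih (pos + PySem.Str.len w + 1) s (pos + PySem.Str.len w) t' acc
      · simp only [List.foldl_cons, aStep, bRun]
        rw [if_neg h, if_neg h]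
        rw [ih (pos + PySem.Str.len w + 1) pos (pos + PySem.Str.len w) t' ((s, e, t) :: acc)]
        simp [groups]

theorem spansA_eq_groups (w : String) (t : String) (rest : List (String × String)) :
    ((List.foldl aStep ((0 : Int), []) ((w, t) :: rest)).2).reverse = groups 0 ((w, t) :: rest) := by
  simp only [List.foldl_cons, aStep]
  rw [foldl_aStep_eq]
  simp [groups]

theorem aIns_eq_bIns (res : PySem.Dict String (List (Int × Int))) (sel : Int × Int × String) :
    aIns res sel = bIns res sel.2.2 (sel.1, sel.2.1) := by
  obtain ⟨s, e, l⟩ := sel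
  by_cases hO : l = "O"
  · simp [aIns, bIns, hO]
  · by_cases hc : res.contains l
    · simp [aIns, bIns, hO, hc, PySem.Dict.modify]
    · have h0 : res.getD l [] = [] := PySem.Dict.getD_of_not_contains res [] (by simpa using hc)
      simp [aIns, bIns, hO, hc, PySem.Dict.modify, h0]

theorem bLoop_eq_foldl (pos : Int) (res : PySem.Dict String (List (Int × Int)))
    (l : List (String × String)) :
    bLoop pos res l = List.foldl aIns res (groups pos l) := by
  induction pos, res, l using bLoop.induct with
  | case1 => simp [bLoop, groups]
  | case2 pos res w t rest r ih =>
      rw [bLoop, groups]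
      simp only [List.foldl_cons, aIns_eq_bIns]
      exact ih

-- ===== VERDICT (by name: the statement is the Claim_ definition above) =====
theorem convert_spanformat_spec : Claim_equal_convert_spanformat := by
  intro arr _
  unfold Spec_convert_spanformat convert_spanformat convert_spanformat_alt
  match arr with
  | [] => simp
  | (w, t) :: rest =>
      simp only [List.length_cons]
      rw [if_neg (by omega), if_neg (by omega)]
      rw [spansA_eq_groups, bLoop_eq_foldl]
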